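-- pv_equiv track=rewrite | github.com/mohouhaddou/coordination | check_interference.py | _column_slices
-- ===== SOURCE A (Python) =====
-- from typing import List, Tuple, Dict, Any
--
-- def _column_slices(header: str) -> List[Tuple[str, int, int]]:
--     """
--     Déduit les colonnes (noms + tranches) à partir de l'en-tête aligné.
--     On détecte toutes les transitions 'espace -> non-espace' comme début de colonne.
--     """
--     starts = []
--     for i, ch in enumerate(header.rstrip("\n")):
--         if (i == 0 and ch != " ") or (i > 0 and ch != " " and header[i-1] == " "):
--             starts.append(i)
--     # bornes de fin = début de la colonne suivante
--     ends = starts[1:] + [len(header.rstrip("\n"))]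
--     cols = []
--     for s, e in zip(starts, ends):
--         name = header[s:e].strip()
--         # ignorer colonnes vides
--         if name:
--             cols.append((name, s, e))
--     return cols
-- ===== SOURCE B (Python) =====
-- from typing import List, Tuple
--
-- def _column_slices(header: str) -> List[Tuple[str, int, int]]:
--     h = header.rstrip("\n")
--     starts = []
--     pos = 0
--     for tok in h.split(" "):
--         if tok:
--             starts.append(pos)
--         pos += len(tok) + 1
--     ends = starts[1:] + [len(h)]
--     return [(h[s:e].strip(), s, e)
--             for s, e in zip(starts, ends)
--             if h[s:e].strip()]
-- ===== Notes on version B (the rewrite author's own statement) =====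
-- stated objective: idiomatic
-- what changed: Replaces A's per-character space->non-space transition scan (with index lookbacks into the header) by a single-space-split token walk that accumulates each token's start offset in one pass over the tokens, and builds the result with a comprehension instead of an append loop.
import Mathlib
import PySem

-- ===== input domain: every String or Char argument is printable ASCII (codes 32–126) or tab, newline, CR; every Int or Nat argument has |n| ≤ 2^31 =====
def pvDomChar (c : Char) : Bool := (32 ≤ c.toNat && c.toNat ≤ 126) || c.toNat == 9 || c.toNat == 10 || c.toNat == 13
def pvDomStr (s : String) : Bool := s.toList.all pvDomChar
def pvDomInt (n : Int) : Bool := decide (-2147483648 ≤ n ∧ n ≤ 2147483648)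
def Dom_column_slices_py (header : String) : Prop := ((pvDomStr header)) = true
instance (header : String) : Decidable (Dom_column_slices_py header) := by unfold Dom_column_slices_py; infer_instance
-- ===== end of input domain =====

-- B replaces A's per-character transition scan by a split(" ")-token walk (idiomatic, one pass over tokens).

-- ===== PORT A =====
-- helper for header.rstrip("\n"): PySem.Chars.rstrip strips all whitespace, Python here strips
-- only '\n', so this single-char variant is ported by hand — exact for the chars argument "\n".
def pvRstripNl (cs : List Char) : List Char :=
  (cs.reverse.dropWhile (fun c => c == '\n')).reverse

def column_slices_py (header : String) : List (String × Int × Int) :=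
  let full := header.toList
  let h := pvRstripNl full
  let starts : List Int :=
    (PySem.List.enumerate h 0).foldl (fun acc p =>
      if (p.1 == 0 && !(p.2 == ' ')) ||
         (decide (0 < p.1) && !(p.2 == ' ') && (PySem.List.pyGet? full (p.1 - 1) == some ' '))
      then acc ++ [p.1] else acc) []
  let ends : List Int := PySem.List.slice starts (some 1) none ++ [(h.length : Int)]
  (starts.zip ends).foldl (fun cols se =>
    let name := PySem.Chars.strip (PySem.List.slice full (some se.1) (some se.2))
    if name ≠ [] then cols ++ [(String.ofList name, se.1, se.2)] else cols) []

-- ===== PORT B =====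
def column_slices_py_alt (header : String) : List (String × Int × Int) :=
  let h := pvRstripNl header.toList
  let sp := (PySem.Chars.splitOn h [' ']).foldl
      (fun st tok => (if tok ≠ [] then st.1 ++ [st.2] else st.1, st.2 + (tok.length : Int) + 1))
      (([] : List Int), (0 : Int))
  let starts := sp.1
  let ends : List Int := PySem.List.slice starts (some 1) none ++ [(h.length : Int)]
  (starts.zip ends).filterMap (fun se =>
    let name := PySem.Chars.strip (PySem.List.slice h (some se.1) (some se.2))
    if name ≠ [] then some (String.ofList name, se.1, se.2) else none)

-- ===== PRECONDITION & SPEC =====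
def Spec_column_slices_py (header : String) (out : List (String × Int × Int)) : Prop := out = column_slices_py_alt header
instance (header : String) (out : List (String × Int × Int)) : Decidable (Spec_column_slices_py header out) := by unfold Spec_column_slices_py; infer_instance

-- ===== CLAIM (what is proved, stated in full; the proofs are below) =====
def Claim_equal_column_slices_py : Prop := ∀ (header : String), Dom_column_slices_py header → Spec_column_slices_py header (column_slices_py header)

-- ===== LEMMAS AND PROOFS =====

def pvSplitSimple : List Char → List (List Char)
  | [] => [[]]
  | c :: r => if c = ' ' then [] :: pvSplitSimple r else (pvSplitSimple r).modifyHead (c :: ·)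

lemma pv_go_spec (fuel : Nat) : ∀ (l : List Char) (cur : List Char) (acc : List (List Char)),
    l.length ≤ fuel →
    PySem.Chars.splitOn.go [' '] fuel l cur acc
      = acc.reverse ++ (pvSplitSimple l).modifyHead (cur.reverse ++ ·) := by
  induction fuel with
  | zero =>
    intro l cur acc h
    have : l = [] := List.eq_nil_of_length_eq_zero (Nat.le_zero.mp h)
    subst this
    simp [PySem.Chars.splitOn.go, pvSplitSimple]
  | succ fuel ih =>
    intro l cur acc h
    cases l with
    | nil => simp [PySem.Chars.splitOn.go, pvSplitSimple]
    | cons c rest =>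
      by_cases hc : c = ' '
      · subst hc
        rw [PySem.Chars.splitOn.go]
        simp only [List.isPrefixOf, beq_self_eq_true, Bool.and_true, if_pos, List.length_cons,
          List.length_nil, Nat.zero_add, List.drop_succ_cons, List.drop]
        rw [ih rest [] _ (by simpa using h)]
        simp [pvSplitSimple]
        cases pvSplitSimple rest <;> simp
      · rw [PySem.Chars.splitOn.go]
        have hpre : [' '].isPrefixOf (c :: rest) = false := by
          simp [List.isPrefixOf]; exact fun hh => absurd hh.symm hc
        rw [hpre]
        simp only [if_neg Bool.false_ne_true]
        rw [ih rest (c :: cur) acc (by simpa using h)]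
        simp [pvSplitSimple, hc]
        cases pvSplitSimple rest <;> simp

lemma pv_splitOn_eq (cs : List Char) : PySem.Chars.splitOn cs [' '] = pvSplitSimple cs := by
  rw [PySem.Chars.splitOn, pv_go_spec _ _ _ _ (by omega)]
  cases pvSplitSimple cs <;> simp

lemma pvSplitSimple_ne_nil (cs : List Char) : pvSplitSimple cs ≠ [] := by
  cases cs with
  | nil => simp [pvSplitSimple]
  | cons c r =>
    simp only [pvSplitSimple]
    split
    · simp
    · cases h : pvSplitSimple r with
      | nil => exact absurd h (pvSplitSimple_ne_nil r)
      | cons a b => simp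

def pvStartsSpec : List Char → Bool → Int → List Int
  | [], _, _ => []
  | c :: r, prev, pos => (if !(c == ' ') && prev then [pos] else []) ++ pvStartsSpec r (c == ' ') (pos + 1)

def pvTokStarts : List (List Char) → Int → List Int
  | [], _ => []
  | t :: ts, pos => (if t ≠ [] then [pos] else []) ++ pvTokStarts ts (pos + t.length + 1)

lemma pv_tok_spec (cs : List Char) : ∀ pos : Int,
    pvTokStarts (pvSplitSimple cs) pos = pvStartsSpec cs true pos ∧
    pvStartsSpec cs false pos
      = pvTokStarts (pvSplitSimple cs).tail (pos + (((pvSplitSimple cs).headD []).length : Int) + 1) := by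
  induction cs with
  | nil => intro pos; simp [pvSplitSimple, pvStartsSpec, pvTokStarts]
  | cons c r ih =>
    intro pos
    by_cases hc : c = ' '
    · subst hc
      have h1 : pvSplitSimple (' ' :: r) = [] :: pvSplitSimple r := by simp [pvSplitSimple]
      refine ⟨?_, ?_⟩
      · rw [h1]
        calc pvTokStarts ([] :: pvSplitSimple r) pos
            = pvTokStarts (pvSplitSimple r) (pos + 1) := by simp [pvTokStarts]
          _ = pvStartsSpec r true (pos + 1) := (ih (pos + 1)).1
          _ = pvStartsSpec (' ' :: r) true pos := by simp [pvStartsSpec]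
      · rw [h1]
        simp only [List.tail_cons, List.headD_cons, List.length_nil]
        calc pvStartsSpec (' ' :: r) false pos
            = pvStartsSpec r true (pos + 1) := by simp [pvStartsSpec]
          _ = pvTokStarts (pvSplitSimple r) (pos + 1) := ((ih (pos + 1)).1).symm
          _ = pvTokStarts (pvSplitSimple r) (pos + ((0 : Nat) : Int) + 1) := by norm_num
    · obtain ⟨t, ts, hts⟩ := List.exists_cons_of_ne_nil (pvSplitSimple_ne_nil r)
      have hsp : pvSplitSimple (c :: r) = (c :: t) :: ts := by
        simp [pvSplitSimple, hc, hts]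
      have h := (ih (pos + 1)).2
      rw [hts] at h
      simp only [List.tail_cons, List.headD_cons] at h
      have hcb : (c == ' ') = false := beq_eq_false_iff_ne.mpr hc
      have harg : pos + (((c :: t).length : Nat) : Int) + 1 = pos + 1 + (t.length : Int) + 1 := by
        push_cast [List.length_cons]; ring
      refine ⟨?_, ?_⟩
      · rw [hsp]
        calc pvTokStarts ((c :: t) :: ts) pos
            = pos :: pvTokStarts ts (pos + (((c :: t).length : Nat) : Int) + 1) := by
              simp [pvTokStarts]
          _ = pos :: pvTokStarts ts (pos + 1 + (t.length : Int) + 1) := by rw [harg]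
          _ = pos :: pvStartsSpec r false (pos + 1) := by rw [h]
          _ = pvStartsSpec (c :: r) true pos := by simp [pvStartsSpec, hcb]
      · rw [hsp]
        simp only [List.tail_cons, List.headD_cons]
        calc pvStartsSpec (c :: r) false pos
            = pvStartsSpec r false (pos + 1) := by simp [pvStartsSpec, hcb]
          _ = pvTokStarts ts (pos + 1 + (t.length : Int) + 1) := h
          _ = pvTokStarts ts (pos + (((c :: t).length : Nat) : Int) + 1) := by rw [harg]

lemma pv_b_fold (ts : List (List Char)) : ∀ (acc : List Int) (pos : Int),
    (ts.foldl (fun st tok => (if tok ≠ [] then st.1 ++ [st.2] else st.1, st.2 + (tok.length : Int) + 1))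
      (acc, pos)).1 = acc ++ pvTokStarts ts pos := by
  induction ts with
  | nil => intro acc pos; simp [pvTokStarts]
  | cons t ts ih =>
    intro acc pos
    simp only [List.foldl_cons]
    by_cases h : t = []
    · subst h; rw [ih]; simp [pvTokStarts]
    · simp only [if_pos (by simpa using h : t ≠ [])]
      rw [ih]
      simp [pvTokStarts, h]

lemma pv_starts_bounds (cs : List Char) : ∀ (prev : Bool) (pos : Int) (m : Int),
    m ∈ pvStartsSpec cs prev pos → pos ≤ m ∧ m < pos + cs.length := by
  induction cs with
  | nil => intro _ _ _ h; simp [pvStartsSpec] at h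
  | cons c r ih =>
    intro prev pos m h
    simp only [pvStartsSpec, List.mem_append] at h
    rcases h with h | h
    · have : m = pos := by
        by_cases hb : (!(c == ' ') && prev) = true
        · simpa [hb] using h
        · simp [hb] at h
      subst this
      refine ⟨le_refl _, ?_⟩
      simp only [List.length_cons]
      push_cast
      omega
    · have := ih (c == ' ') (pos + 1) m h
      refine ⟨by omega, ?_⟩
      simp only [List.length_cons] at this ⊢
      push_cast at this ⊢
      omega

lemma pv_a_fold (full : List Char) (n : Nat) (hn : n ≤ full.length) :
    ∀ (m k : Nat) (acc : List Int), k + m = n →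
    (PySem.List.enumerate ((full.take n).drop k) (k : Int)).foldl (fun acc p =>
      if (p.1 == 0 && !(p.2 == ' ')) ||
         (decide (0 < p.1) && !(p.2 == ' ') && (PySem.List.pyGet? full (p.1 - 1) == some ' '))
      then acc ++ [p.1] else acc) acc
    = acc ++ pvStartsSpec ((full.take n).drop k)
        (k == 0 || (full[k-1]? == some ' ')) (k : Int) := by
  intro m
  induction m with
  | zero =>
    intro k acc hk
    have hk' : k = n := by omega
    subst hk'
    have : (full.take k).drop k = [] := by
      apply List.drop_eq_nil_of_le
      simp [List.length_take]
    rw [this]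
    simp [PySem.List.enumerate, pvStartsSpec]
  | succ m ih =>
    intro k acc hk
    have hklt : k < n := by omega
    have hkf : k < full.length := by omega
    have hlen : k < (full.take n).length := by simp [List.length_take]; omega
    have hds : (full.take n).drop k = full[k] :: (full.take n).drop (k + 1) := by
      rw [List.drop_eq_getElem_cons hlen]
      congr 1
      exact List.getElem_take
    rw [hds, PySem.List.enumerate_cons]
    simp only [List.foldl_cons]
    have hstep : ∀ (b : Bool), (if (((k : Int) == 0) && b) ||
         (decide (0 < (k : Int)) && b && (PySem.List.pyGet? full ((k : Int) - 1) == some ' '))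
      then acc ++ [(k : Int)] else acc)
      = acc ++ (if b && ((k == 0 : Bool) || (full[k-1]? == some ' ')) then [(k : Int)] else []) := by
      intro b
      cases k with
      | zero => cases b <;> simp
      | succ j =>
        have h1 : (((j+1 : Nat) : Int) == 0) = false := by
          rw [beq_eq_false_iff_ne]; push_cast; omega
        have h2 : decide (0 < ((j+1 : Nat) : Int)) = true := by simp
        have h3 : ((j+1 : Nat) : Int) - 1 = (j : Nat) := by push_cast; ring
        have h4 : PySem.List.pyGet? full (((j+1 : Nat) : Int) - 1) = full[j]? := by
          rw [h3]; simp [pysem]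
        rw [h1, h2, h4]
        have h5 : (j + 1 - 1 : Nat) = j := rfl
        cases b <;> cases hb : (full[j]? == some ' ') <;> simp [h5, hb]
    rw [hstep]
    have hnext : ((k+1 : Nat) == 0 || (full[(k+1)-1]? == some ' ')) = (full[k] == ' ') := by
      simp [List.getElem?_eq_getElem hkf]
    have := ih (k+1) (acc ++ (if (!(full[k] == ' ') && ((k == 0 : Bool) || (full[k-1]? == some ' '))) then [(k : Int)] else [])) (by omega)
    rw [hnext] at this
    rw [show ((k : Int) + 1) = ((k+1 : Nat) : Int) from by push_cast; ring]
    rw [this]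
    simp only [pvStartsSpec]
    push_cast
    simp [List.append_assoc]

lemma pv_prefix (cs : List Char) :
    ∃ t, cs = pvRstripNl cs ++ t := by
  rw [pvRstripNl]
  obtain ⟨t, ht⟩ := List.dropWhile_suffix (l := cs.reverse) (p := fun c => c == '\n')
  refine ⟨t.reverse, ?_⟩
  conv_lhs => rw [← cs.reverse_reverse, ← ht]
  simp

lemma pv_slice_eq (h : List Char) (t : List Char) (a b : Int) (ha : 0 ≤ a) (hb : 0 ≤ b)
    (hah : a.toNat ≤ h.length) (hbh : b.toNat ≤ h.length) :
    PySem.List.slice (h ++ t) (some a) (some b) = PySem.List.slice h (some a) (some b) := by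
  rw [PySem.List.slice_toNat _ ha hb, PySem.List.slice_toNat _ ha hb]
  rw [List.drop_append_of_le_length hah]
  rw [List.take_append_of_le_length (by simp [List.length_drop]; omega)]

lemma pv_filterMap_if {α β : Type} (p : α → Prop) [DecidablePred p] (f : α → β) (l : List α) :
    l.filterMap (fun x => if p x then some (f x) else none)
      = (l.filter (fun x => decide (p x))).map f := by
  induction l with
  | nil => rfl
  | cons x xs ih => by_cases hx : p x <;> simp [hx, ih]

lemma pv_starts_A (h t : List Char) :
    (PySem.List.enumerate h 0).foldl (fun acc p =>
      if (p.1 == 0 && !(p.2 == ' ')) ||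
         (decide (0 < p.1) && !(p.2 == ' ') && (PySem.List.pyGet? (h ++ t) (p.1 - 1) == some ' '))
      then acc ++ [p.1] else acc) [] = pvStartsSpec h true 0 := by
  have hn : h.length ≤ (h ++ t).length := by simp
  have h0 : ((h ++ t).take h.length).drop 0 = h := by simp
  have := pv_a_fold (h ++ t) h.length hn h.length 0 [] (by omega)
  rw [h0] at this
  simpa using this

lemma pv_starts_B (h : List Char) :
    ((PySem.Chars.splitOn h [' ']).foldl
      (fun st tok => (if tok ≠ [] then st.1 ++ [st.2] else st.1, st.2 + (tok.length : Int) + 1))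
      (([] : List Int), (0 : Int))).1 = pvStartsSpec h true 0 := by
  rw [pv_splitOn_eq, pv_b_fold]
  simpa using (pv_tok_spec h 0).1

lemma pv_main (header : String) : column_slices_py header = column_slices_py_alt header := by
  unfold column_slices_py column_slices_py_alt
  dsimp only
  set h := pvRstripNl header.toList with hh
  obtain ⟨t, ht⟩ := pv_prefix header.toList
  rw [← hh] at ht
  rw [ht]
  rw [pv_starts_A h t, pv_starts_B h]
  set S := pvStartsSpec h true 0 with hS
  set E := PySem.List.slice S (some 1) none ++ [(h.length : Int)] with hE
  have hmem : ∀ (acc : List (String × Int × Int)) (se : Int × Int), se ∈ S.zip E →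
      (fun cols (se : Int × Int) =>
        if PySem.Chars.strip (PySem.List.slice (h ++ t) (some se.1) (some se.2)) ≠ [] then
          cols ++ [(String.ofList (PySem.Chars.strip (PySem.List.slice (h ++ t) (some se.1) (some se.2))), se.1, se.2)]
        else cols) acc se
      = (fun cols (se : Int × Int) =>
        if PySem.Chars.strip (PySem.List.slice h (some se.1) (some se.2)) ≠ [] then
          cols ++ [(String.ofList (PySem.Chars.strip (PySem.List.slice h (some se.1) (some se.2))), se.1, se.2)]
        else cols) acc se := by
    intro acc se hse
    obtain ⟨hs1, hs2⟩ := List.of_mem_zip hse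
    have hb1 := pv_starts_bounds h true 0 se.1 (by rw [hS] at hs1; exact hs1)
    have hb2 : 0 ≤ se.2 ∧ se.2 ≤ (h.length : Int) := by
      rw [hE] at hs2
      rcases List.mem_append.mp hs2 with hmem2 | hmem2
      · rw [PySem.List.slice_from_one] at hmem2
        have := pv_starts_bounds h true 0 se.2 (by rw [hS] at *; exact List.mem_of_mem_tail hmem2)
        omega
      · simp at hmem2
        omega
    have := pv_slice_eq h t se.1 se.2 (by omega) (by omega) (by omega) (by omega)
    simp only [this]
  have hfold := PySem.List.foldl_congr_mem (S.zip E) _ _ ([] : List (String × Int × Int)) hmem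
  rw [hfold]
  rw [PySem.List.foldl_append_ite
    (p := fun se : Int × Int => PySem.Chars.strip (PySem.List.slice h (some se.1) (some se.2)) ≠ [])
    (f := fun se : Int × Int => (String.ofList (PySem.Chars.strip (PySem.List.slice h (some se.1) (some se.2))), se.1, se.2))]
  rw [pv_filterMap_if
    (p := fun se : Int × Int => PySem.Chars.strip (PySem.List.slice h (some se.1) (some se.2)) ≠ [])
    (f := fun se : Int × Int => (String.ofList (PySem.Chars.strip (PySem.List.slice h (some se.1) (some se.2))), se.1, se.2))]
  simp

-- ===== VERDICT (by name: the statement is the Claim_ definition above) =====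
theorem column_slices_py_spec : Claim_equal_column_slices_py := by
  intro header _
  unfold Spec_column_slices_py
  exact pv_main header
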